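-- pv_equiv track=rewrite | github.com/jnegrite/Competitive-Programming | Chapter 5/5.6/uva/11036.py | convertRPN
-- ===== SOURCE A (Python) =====
-- operators = ['+','*','%']
--
-- def convertRPN(values: list[str]):
--     expr = []
--
--     for value in values:
--         if value in operators:
--             p2 = expr.pop(-1)
--             p1 = expr.pop(-1)
--
--             expr.append(f'({p1}{value}{p2})')
--         else:
--             expr.append(value)
--
--     return expr.pop(-1)
-- ===== SOURCE B (Python) =====
-- operators = ['+','*','%']
--
-- def convertRPN(values: list[str]):
--     # Recursive-descent parse of the reversed token list: an operator token
--     # builds its right operand first, then its left, mirroring RPN structure.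
--     def parse(rest):
--         if not rest:
--             raise IndexError('pop from empty list')
--         tok, rest = rest[0], rest[1:]
--         if tok in operators:
--             right, rest = parse(rest)
--             left, rest = parse(rest)
--             return f'({left}{tok}{right})', rest
--         return tok, rest
--     return parse(values[::-1])[0]
-- ===== Notes on version B (the rewrite author's own statement) =====
-- stated objective: alternative
-- what changed: Replaces the explicit left-to-right stack loop with a recursive-descent parse of the reversed token list (operator builds right operand, then left).
import Mathlib
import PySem

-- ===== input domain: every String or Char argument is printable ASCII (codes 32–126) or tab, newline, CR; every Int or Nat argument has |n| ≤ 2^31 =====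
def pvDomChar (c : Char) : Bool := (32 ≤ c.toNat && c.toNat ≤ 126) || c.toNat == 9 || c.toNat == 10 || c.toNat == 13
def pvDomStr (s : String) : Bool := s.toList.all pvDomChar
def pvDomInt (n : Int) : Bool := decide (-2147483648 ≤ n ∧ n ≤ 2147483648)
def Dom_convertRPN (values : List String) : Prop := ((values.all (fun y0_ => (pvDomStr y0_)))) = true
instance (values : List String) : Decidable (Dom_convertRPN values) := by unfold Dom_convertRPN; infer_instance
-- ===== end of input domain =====

-- B replaces A's explicit stack loop with a recursive-descent parse of the reversed
-- token list (alternative decomposition, same cost); equal on all inputs where A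
-- returns (Pre_), i.e. nonempty token lists with no operand underflow.

-- ===== PORT A =====
-- the module constant `operators`
def opsA : List String := ["+", "*", "%"]

-- one iteration of A's loop; the stack is kept top-first (append/pop at the head),
-- none = an expr.pop(-1) raised IndexError
def stepA (st : Option (List String)) (value : String) : Option (List String) :=
  match st with
  | none => none
  | some e =>
    if value ∈ opsA then
      match e with
      | p2 :: p1 :: rest => some (("(" ++ p1 ++ value ++ p2 ++ ")") :: rest)
      | _ => none
    else some (value :: e)

-- final `return expr.pop(-1)`: head of the top-first stack; "" marks the IndexError
-- cases, which Pre_convertRPN excludes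
def convertRPN (values : List String) : String :=
  match values.foldl stepA (some []) with
  | some (x :: _) => x
  | _ => ""

-- ===== PORT B =====
def opsB : List String := ["+", "*", "%"]

-- Source B's parse(rest): reads one token, recurses for right then left operand.
-- Fuel (≥ list length suffices: every call consumes a token) only makes the same
-- recursion total; none = the explicit IndexError raise on empty rest.
def parseB : Nat → List String → Option (String × List String)
  | 0, _ => none
  | _ + 1, [] => none
  | f + 1, tok :: rest =>
    if tok ∈ opsB then
      match parseB f rest with
      | some (right, r1) =>
        match parseB f r1 with
        | some (left, r2) => some (("(" ++ left ++ tok ++ right ++ ")"), r2)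
        | none => none
      | none => none
    else some ((tok, rest))

def convertRPN_alt (values : List String) : String :=
  match parseB values.length values.reverse with
  | some (e, _) => e
  | none => ""

-- ===== PRECONDITION & SPEC =====
-- pvOk d ts: scanning ts with d operands already available, every operator finds
-- at least two operands (the standard validity count for an RPN tail).
def pvOk : Int → List String → Bool
  | _, [] => true
  | d, t :: ts =>
    if t ∈ (["+", "*", "%"] : List String) then (2 ≤ d) && pvOk (d - 1) ts
    else pvOk (d + 1) ts

-- Pre_ excludes exactly the inputs where A raises IndexError: the empty list and
-- lists where some operator token has fewer than two operands available.
def Pre_convertRPN (values : List String) : Prop :=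
  values ≠ [] ∧ pvOk 0 values = true

instance (values : List String) : Decidable (Pre_convertRPN values) := by
  unfold Pre_convertRPN; infer_instance

def pvWitness_convertRPN : List String := ["1", "2", "+"]

def Spec_convertRPN (values : List String) (out : String) : Prop := out = convertRPN_alt values
instance (values : List String) (out : String) : Decidable (Spec_convertRPN values out) := by unfold Spec_convertRPN; infer_instance

-- ===== CLAIM (what is proved, stated in full; the proofs are below) =====
def Claim_equal_convertRPN : Prop := ∀ (values : List String), Dom_convertRPN values → Pre_convertRPN values → Spec_convertRPN values (convertRPN values)

-- ===== LEMMAS AND PROOFS =====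

theorem parseB_nil (f : Nat) : parseB f [] = none := by
  cases f <;> rfl

theorem parseB_suffix : ∀ (f : Nat) (xs : List String) (e : String) (rest : List String),
    parseB f xs = some (e, rest) → rest.length < xs.length := by
  intro f
  induction f with
  | zero => intro xs e rest h; simp [parseB] at h
  | succ f ih =>
    intro xs e rest h
    match xs with
    | [] => simp [parseB] at h
    | tok :: r0 =>
      by_cases htok : tok ∈ opsB
      · simp only [parseB, if_pos htok] at h
        cases h1 : parseB f r0 with
        | none => rw [h1] at h; dsimp only at h; simp at h
        | some p1 =>
          obtain ⟨right, r1⟩ := p1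
          rw [h1] at h
          dsimp only at h
          cases h2 : parseB f r1 with
          | none => rw [h2] at h; dsimp only at h; simp at h
          | some p2 =>
            obtain ⟨left, r2⟩ := p2
            rw [h2] at h
            dsimp only at h
            simp at h
            have := ih r0 right r1 h1
            have := ih r1 left r2 h2
            simp [← h.2]
            omega
      · simp only [parseB, if_neg htok] at h
        simp at h
        simp [← h.2]

theorem parseB_fuel : ∀ (f1 f2 : Nat) (xs : List String),
    xs.length ≤ f1 → xs.length ≤ f2 → parseB f1 xs = parseB f2 xs := by
  intro f1
  induction f1 with
  | zero =>
    intro f2 xs h1 h2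
    have : xs = [] := by cases xs <;> simp_all
    subst this; simp [parseB_nil]
  | succ f ih =>
    intro f2 xs h1 h2
    match xs with
    | [] => simp [parseB_nil]
    | tok :: r0 =>
      obtain ⟨g, rfl⟩ : ∃ g, f2 = g + 1 := by
        cases f2 with
        | zero => simp at h2
        | succ g => exact ⟨g, rfl⟩
      by_cases htok : tok ∈ opsB
      · simp only [parseB, if_pos htok]
        have hr0 : parseB f r0 = parseB g r0 := by
          apply ih <;> simp at h1 h2 <;> omega
        rw [← hr0]
        cases h1' : parseB f r0 with
        | none => rfl
        | some p1 =>
          obtain ⟨right, r1⟩ := p1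
          have hlen : r1.length < r0.length := parseB_suffix f r0 right r1 h1'
          have hr1 : parseB f r1 = parseB g r1 := by
            apply ih <;> simp at h1 h2 <;> omega
          dsimp only
          rw [hr1]
      · simp only [parseB, if_neg htok]

-- repeated parse to exhaustion: the list of expressions (top-first) the reversed
-- remaining input denotes; proof-only helper
def parseAllF : Nat → List String → Option (List String)
  | _, [] => some []
  | 0, _ :: _ => none
  | f + 1, tok :: r0 =>
    match parseB (tok :: r0).length (tok :: r0) with
    | some (e, rest) =>
      match parseAllF f rest with
      | some l => some (e :: l)
      | none => none
    | none => none

theorem parseAllF_fuel : ∀ (f1 f2 : Nat) (xs : List String),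
    xs.length ≤ f1 → xs.length ≤ f2 → parseAllF f1 xs = parseAllF f2 xs := by
  intro f1
  induction f1 with
  | zero =>
    intro f2 xs h1 h2
    have : xs = [] := by cases xs <;> simp_all
    subst this
    cases f2 <;> rfl
  | succ f ih =>
    intro f2 xs h1 h2
    match xs with
    | [] => cases f2 <;> rfl
    | tok :: r0 =>
      obtain ⟨g, rfl⟩ : ∃ g, f2 = g + 1 := by
        cases f2 with
        | zero => simp at h2
        | succ g => exact ⟨g, rfl⟩
      simp only [parseAllF]
      cases hp : parseB (tok :: r0).length (tok :: r0) with
      | none => rfl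
      | some p =>
        obtain ⟨e, rest⟩ := p
        dsimp only
        have hlen : rest.length < (tok :: r0).length :=
          parseB_suffix _ _ _ _ hp
        have : parseAllF f rest = parseAllF g rest := by
          apply ih <;> simp at h1 h2 hlen <;> omega
        rw [this]

-- main bridge: whenever A's loop yields stack st (top-first), repeatedly parsing
-- the reversed input yields exactly st
theorem fold_parseAll : ∀ (ts st : List String),
    ts.foldl stepA (some []) = some st →
    parseAllF ts.reverse.length ts.reverse = some st := by
  intro ts
  induction ts using List.reverseRecOn with
  | nil =>
    intro st h
    simp [List.foldl] at h
    subst h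
    simp [parseAllF]
  | append_singleton ts' t ih =>
    intro st h
    rw [List.foldl_append] at h
    cases h0 : ts'.foldl stepA (some []) with
    | none => rw [h0] at h; simp [stepA] at h
    | some st0 =>
      rw [h0] at h
      have hall := ih st0 h0
      have hrev : (ts' ++ [t]).reverse = t :: ts'.reverse := by simp
      rw [hrev]
      by_cases htok : t ∈ opsA
      · -- operator: st0 = p2 :: p1 :: rest
        simp only [List.foldl, stepA, if_pos htok] at h
        match hst0 : st0 with
        | [] => simp at h
        | [p2] => simp at h
        | p2 :: p1 :: rest =>
          simp only [Option.some.injEq] at h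
          subst h
          rcases hrc : ts'.reverse with _ | ⟨y, r0⟩
          · rw [hrc] at hall; simp [parseAllF] at hall
          · rw [hrc] at hall
            rw [parseAllF.eq_def] at hall
            simp only [List.length_cons] at hall
            cases hp1 : parseB (r0.length + 1) (y :: r0) with
            | none => rw [hp1] at hall; dsimp only at hall; exact absurd hall (by simp)
            | some q1 =>
              obtain ⟨e1, r1⟩ := q1
              rw [hp1] at hall
              dsimp only at hall
              cases ha1 : parseAllF r0.length r1 with
              | none => rw [ha1] at hall; dsimp only at hall; exact absurd hall (by simp)
              | some l1 =>
                rw [ha1] at hall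
                dsimp only at hall
                simp only [Option.some.injEq, List.cons.injEq] at hall
                obtain ⟨he1, hl1⟩ := hall
                subst he1
                subst hl1
                rcases r1 with _ | ⟨z, r1'⟩
                · simp [parseAllF] at ha1
                · have hs1 : r1'.length + 1 < r0.length + 1 := by
                    have := parseB_suffix _ _ _ _ hp1
                    simpa using this
                  obtain ⟨m, hm⟩ : ∃ m, r0.length = m + 1 := ⟨r0.length - 1, by omega⟩
                  rw [hm] at ha1
                  rw [parseAllF.eq_def] at ha1
                  simp only [List.length_cons] at ha1
                  cases hp2 : parseB (r1'.length + 1) (z :: r1') with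
                  | none => rw [hp2] at ha1; dsimp only at ha1; exact absurd ha1 (by simp)
                  | some q2 =>
                    obtain ⟨e2, r2⟩ := q2
                    rw [hp2] at ha1
                    dsimp only at ha1
                    cases ha2 : parseAllF m r2 with
                    | none => rw [ha2] at ha1; dsimp only at ha1; exact absurd ha1 (by simp)
                    | some l2 =>
                      rw [ha2] at ha1
                      dsimp only at ha1
                      simp only [Option.some.injEq, List.cons.injEq] at ha1
                      obtain ⟨he2, hl2⟩ := ha1
                      subst he2
                      subst hl2
                      have hs2 : r2.length < r1'.length + 1 := by
                        have := parseB_suffix _ _ _ _ hp2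
                        simpa using this
                      -- B's parse on the whole reversed input
                      have hBtop : parseB (t :: y :: r0).length (t :: y :: r0)
                          = some ("(" ++ e2 ++ t ++ e1 ++ ")", r2) := by
                        rw [parseB.eq_def]
                        simp only [List.length_cons]
                        rw [if_pos (show t ∈ opsB from htok)]
                        rw [hp1]
                        dsimp only
                        have hf : parseB (r0.length + 1) (z :: r1')
                            = parseB (r1'.length + 1) (z :: r1') := by
                          apply parseB_fuel <;> simp <;> omega
                        rw [hf, hp2]
                      rw [parseAllF.eq_def]
                      simp only [List.length_cons]
                      have hBtop' : parseB (r0.length + 1 + 1) (t :: y :: r0)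
                          = some ("(" ++ e2 ++ t ++ e1 ++ ")", r2) := by
                        rw [← hBtop]; simp
                      rw [hBtop']
                      dsimp only
                      have hf2 : parseAllF (r0.length + 1) r2 = parseAllF m r2 := by
                        apply parseAllF_fuel <;> omega
                      rw [hf2, ha2]
      · -- operand: st = t :: st0
        simp only [List.foldl, stepA, if_neg htok] at h
        simp only [Option.some.injEq] at h
        subst h
        rw [parseAllF.eq_def]
        simp only [List.length_cons]
        have hB : parseB (ts'.reverse.length + 1) (t :: ts'.reverse)
            = some (t, ts'.reverse) := by
          rw [parseB.eq_def]
          dsimp only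
          rw [if_neg (show ¬ t ∈ opsB from htok)]
        rw [hB]
        dsimp only
        rw [hall]

-- A's loop succeeds with a nonempty stack on every Pre_ input (generalized invariant)
theorem foldA_ok : ∀ (ts st : List String), pvOk (st.length : Int) ts = true →
    ∃ st', ts.foldl stepA (some st) = some st' ∧ (ts ≠ [] → st' ≠ []) := by
  intro ts
  induction ts with
  | nil => intro st _; exact ⟨st, rfl, by simp⟩
  | cons t ts ih =>
    intro st hok
    by_cases htok : t ∈ opsA
    · have htok' : t ∈ (["+", "*", "%"] : List String) := htok
      simp only [pvOk, if_pos htok', Bool.and_eq_true, decide_eq_true_eq] at hok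
      obtain ⟨hd, hok'⟩ := hok
      match st with
      | [] => simp at hd
      | [p] => simp at hd
      | p2 :: p1 :: rest =>
        simp only [List.foldl, stepA, if_pos htok]
        have : pvOk (((("(" ++ p1 ++ t ++ p2 ++ ")") :: rest).length : Nat) : Int) ts = true := by
          have : ((("(" ++ p1 ++ t ++ p2 ++ ")") :: rest).length : Int) =
              ((p2 :: p1 :: rest).length : Int) - 1 := by simp
          rw [this]; exact hok'
        obtain ⟨st', h1, h2⟩ := ih _ this
        refine ⟨st', h1, fun _ => ?_⟩
        cases ts with
        | nil => simp only [List.foldl, Option.some.injEq] at h1; simp [← h1]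
        | cons a b => exact h2 (by simp)
    · have htok' : ¬ t ∈ (["+", "*", "%"] : List String) := htok
      simp only [pvOk, if_neg htok'] at hok
      simp only [List.foldl, stepA, if_neg htok]
      have : pvOk (((t :: st).length : Nat) : Int) ts = true := by
        have : (((t :: st).length : Nat) : Int) = (st.length : Int) + 1 := by simp
        rw [this]; exact hok
      obtain ⟨st', h1, h2⟩ := ih _ this
      refine ⟨st', h1, fun _ => ?_⟩
      cases ts with
      | nil => simp only [List.foldl, Option.some.injEq] at h1; simp [← h1]
      | cons a b => exact h2 (by simp)

-- ===== VERDICT (by name: the statement is the Claim_ definition above) =====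
theorem convertRPN_spec : Claim_equal_convertRPN := by
  intro values _ hpre
  obtain ⟨hne, hok⟩ := hpre
  obtain ⟨st, hfold, hnem⟩ := foldA_ok values [] (by simpa using hok)
  have hall := fold_parseAll values st hfold
  rcases st with _ | ⟨x, s⟩
  · exact absurd rfl (hnem hne)
  · unfold Spec_convertRPN convertRPN convertRPN_alt
    rw [hfold]
    rcases hrev : values.reverse with _ | ⟨y, r0⟩
    · rw [hrev] at hall; simp [parseAllF] at hall
    · rw [hrev] at hall
      rw [parseAllF.eq_def] at hall
      simp only [List.length_cons] at hall
      cases hp : parseB (r0.length + 1) (y :: r0) with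
      | none => rw [hp] at hall; dsimp only at hall; exact absurd hall (by simp)
      | some q =>
        obtain ⟨e, rest⟩ := q
        rw [hp] at hall
        dsimp only at hall
        cases ha : parseAllF r0.length rest with
        | none => rw [ha] at hall; dsimp only at hall; exact absurd hall (by simp)
        | some l =>
          rw [ha] at hall
          dsimp only at hall
          simp only [Option.some.injEq, List.cons.injEq] at hall
          have hlen : values.length = r0.length + 1 := by
            have h' : values.reverse.length = values.length := by simp
            rw [hrev] at h'
            simpa using h'.symm
          rw [hlen, hp]
          dsimp only
          exact hall.1.symm
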